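-- pv_equiv track=rewrite | github.com/GautierDorval/q-ledger | scripts/metrics.py | detect_sequences_legacy
-- ===== SOURCE A (Python) =====
-- from typing import Any, Dict, List, Optional, Tuple
--
-- def is_governance_path_legacy(path: str) -> bool:
--     markers = [
--         "/.well-known/",
--         "/ai-governance.json",
--         "/ai-manifest.json",
--         "/dualweb-index.md",
--         "/response-legitimacy",
--         "/llms",
--         "/readme.llm.txt",
--         "/canon.md",
--         "/identity.json",
--         "/services-non-publics.md",
--         "/author.md",
--         "/humans.txt",
--         "/site-context.md",
--         "/editorial-context.md",
--         "/non-goals.md",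
--         "/negative-definitions.md",
--         "/output-constraints.md",
--         "/data-handling.md",
--         "/citations.md",
--         "/changelog-ai.md"
--     ]
--     return any(m in path for m in markers)
--
-- def is_content_path_legacy(path: str) -> bool:
--     if is_governance_path_legacy(path):
--         return False
--     if path.endswith((".json", ".jsonld", ".yaml", ".yml", ".txt", ".md")):
--         return False
--     return path.endswith("/") or path.count("/") >= 1
--
-- def detect_sequences_legacy(paths: List[str]) -> Dict[str, int]:
--     motifs = {
--         "yaml_then_ledger": 0,
--         "yaml_then_protocol": 0,
--         "ledger_then_protocol": 0,
--         "gov_content_gov": 0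
--     }
--
--     for i in range(len(paths) - 1):
--         a, b = paths[i], paths[i + 1]
--         if a.endswith((".yml", ".yaml")) and "/.well-known/q-ledger" in b:
--             motifs["yaml_then_ledger"] += 1
--         if a.endswith((".yml", ".yaml")) and "q-attest-protocol" in b:
--             motifs["yaml_then_protocol"] += 1
--         if "/.well-known/q-ledger" in a and "q-attest-protocol" in b:
--             motifs["ledger_then_protocol"] += 1
--
--     for i in range(len(paths) - 2):
--         a, b, c = paths[i], paths[i + 1], paths[i + 2]
--         if is_governance_path_legacy(a) and is_content_path_legacy(b) and is_governance_path_legacy(c):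
--             motifs["gov_content_gov"] += 1
--
--     return motifs
-- ===== SOURCE B (Python) =====
-- from typing import Dict, List
--
-- _MARKERS = [
--     "/.well-known/",
--     "/ai-governance.json",
--     "/ai-manifest.json",
--     "/dualweb-index.md",
--     "/response-legitimacy",
--     "/llms",
--     "/readme.llm.txt",
--     "/canon.md",
--     "/identity.json",
--     "/services-non-publics.md",
--     "/author.md",
--     "/humans.txt",
--     "/site-context.md",
--     "/editorial-context.md",
--     "/non-goals.md",
--     "/negative-definitions.md",
--     "/output-constraints.md",
--     "/data-handling.md",
--     "/citations.md",
--     "/changelog-ai.md",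
-- ]
--
-- def is_governance_path_legacy(path: str) -> bool:
--     return any(m in path for m in _MARKERS)
--
-- def detect_sequences_legacy(paths: List[str]) -> Dict[str, int]:
--     ytl = ytp = ltp = gcg = 0
--     pa_gov = None          # governance flag of the element two back (None if absent)
--     pb = None              # (previous element, its gov flag, its content flag), or None
--     for c in paths:
--         c_gov = is_governance_path_legacy(c)
--         if pb is not None:
--             b, b_gov, b_con = pb
--             if b.endswith((".yml", ".yaml")):
--                 if "/.well-known/q-ledger" in c:
--                     ytl += 1
--                 if "q-attest-protocol" in c:
--                     ytp += 1
--             if "/.well-known/q-ledger" in b and "q-attest-protocol" in c: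
--                 ltp += 1
--             if pa_gov is not None and pa_gov and b_con and c_gov:
--                 gcg += 1
--             pa_gov = b_gov
--         # content flag derived from the already computed gov flag (no re-scan)
--         c_con = (not c_gov
--                  and not c.endswith((".json", ".jsonld", ".yaml", ".yml", ".txt", ".md"))
--                  and (c.endswith("/") or c.count("/") >= 1))
--         pb = (c, c_gov, c_con)
--     return {
--         "yaml_then_ledger": ytl,
--         "yaml_then_protocol": ytp,
--         "ledger_then_protocol": ltp,
--         "gov_content_gov": gcg,
--     }
-- ===== Notes on version B (the rewrite author's own statement) =====
-- stated objective: alternative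
-- what changed: Replaces A's two index-based scans (pairs then triples, with is_content re-calling is_governance on every overlapping triple) by a single sliding-window pass over the list that caches each element's governance/content flags and updates four plain counters, building the dict once at the end.
import Mathlib
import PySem

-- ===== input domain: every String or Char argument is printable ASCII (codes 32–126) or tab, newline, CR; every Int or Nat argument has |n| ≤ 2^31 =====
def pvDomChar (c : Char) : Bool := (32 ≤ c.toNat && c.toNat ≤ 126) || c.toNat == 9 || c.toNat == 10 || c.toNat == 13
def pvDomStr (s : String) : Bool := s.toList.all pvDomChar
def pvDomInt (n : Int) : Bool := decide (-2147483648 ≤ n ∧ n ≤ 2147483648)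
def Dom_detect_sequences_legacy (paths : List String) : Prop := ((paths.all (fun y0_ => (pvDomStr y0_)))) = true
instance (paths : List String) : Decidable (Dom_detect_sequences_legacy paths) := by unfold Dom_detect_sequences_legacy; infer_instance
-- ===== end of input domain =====

-- B replaces A's two index-based scans by a single sliding-window pass that caches each
-- element's governance/content flags (alternative decomposition, same results).


-- ===== PORT A =====
def govMarkers : List String :=
  ["/.well-known/", "/ai-governance.json", "/ai-manifest.json", "/dualweb-index.md",
   "/response-legitimacy", "/llms", "/readme.llm.txt", "/canon.md", "/identity.json",
   "/services-non-publics.md", "/author.md", "/humans.txt", "/site-context.md",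
   "/editorial-context.md", "/non-goals.md", "/negative-definitions.md",
   "/output-constraints.md", "/data-handling.md", "/citations.md", "/changelog-ai.md"]

def is_governance_path_legacy (path : String) : Bool :=
  govMarkers.any (fun m => PySem.Str.isIn m path)

-- '.endswith(tuple)' is True iff the string ends with one of the suffixes
def is_content_path_legacy (path : String) : Bool :=
  if is_governance_path_legacy path then false
  else if [".json", ".jsonld", ".yaml", ".yml", ".txt", ".md"].any
            (fun suf => PySem.Str.endswith path suf) then false
  else PySem.Str.endswith path "/" || decide (1 ≤ PySem.Str.count path "/")

def detect_sequences_legacy (paths : List String) : List (String × Int) :=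
  let motifs : PySem.Dict String Int :=
    PySem.Dict.ofList [("yaml_then_ledger", 0), ("yaml_then_protocol", 0),
                       ("ledger_then_protocol", 0), ("gov_content_gov", 0)]
  let motifs := (PySem.List.pyRange 0 ((paths.length : Int) - 1) 1).foldl (fun d i =>
    let a := PySem.List.pyGetD paths i ""
    let b := PySem.List.pyGetD paths (i + 1) ""
    let d := if (PySem.Str.endswith a ".yml" || PySem.Str.endswith a ".yaml") &&
                PySem.Str.isIn "/.well-known/q-ledger" b
             then d.insert "yaml_then_ledger" (d.getD "yaml_then_ledger" 0 + 1) else d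
    let d := if (PySem.Str.endswith a ".yml" || PySem.Str.endswith a ".yaml") &&
                PySem.Str.isIn "q-attest-protocol" b
             then d.insert "yaml_then_protocol" (d.getD "yaml_then_protocol" 0 + 1) else d
    if PySem.Str.isIn "/.well-known/q-ledger" a && PySem.Str.isIn "q-attest-protocol" b
    then d.insert "ledger_then_protocol" (d.getD "ledger_then_protocol" 0 + 1) else d) motifs
  let motifs := (PySem.List.pyRange 0 ((paths.length : Int) - 2) 1).foldl (fun d i =>
    let a := PySem.List.pyGetD paths i ""
    let b := PySem.List.pyGetD paths (i + 1) ""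
    let c := PySem.List.pyGetD paths (i + 2) ""
    if is_governance_path_legacy a && is_content_path_legacy b && is_governance_path_legacy c
    then d.insert "gov_content_gov" (d.getD "gov_content_gov" 0 + 1) else d) motifs
  motifs.items

-- ===== PORT B =====
-- state: (ytl, ytp, ltp, gcg, pa_gov, pb = (previous element, its gov flag, its content flag))
def bStep (st : Int × Int × Int × Int × Option Bool × Option (String × Bool × Bool))
    (c : String) : Int × Int × Int × Int × Option Bool × Option (String × Bool × Bool) :=
  let cGov := is_governance_path_legacy c
  match st with
  | (ytl, ytp, ltp, gcg, paGov, pb) =>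
    let (ytl, ytp, ltp, gcg, paGov) :=
      match pb with
      | some (b, bGov, bCon) =>
        let ytl := if (PySem.Str.endswith b ".yml" || PySem.Str.endswith b ".yaml") &&
                      PySem.Str.isIn "/.well-known/q-ledger" c then ytl + 1 else ytl
        let ytp := if (PySem.Str.endswith b ".yml" || PySem.Str.endswith b ".yaml") &&
                      PySem.Str.isIn "q-attest-protocol" c then ytp + 1 else ytp
        let ltp := if PySem.Str.isIn "/.well-known/q-ledger" b &&
                      PySem.Str.isIn "q-attest-protocol" c then ltp + 1 else ltp
        let gcg := match paGov with
          | some ag => if ag && bCon && cGov then gcg + 1 else gcg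
          | none => gcg
        (ytl, ytp, ltp, gcg, some bGov)
      | none => (ytl, ytp, ltp, gcg, paGov)
    -- content flag derived from the already computed gov flag
    let cCon := !cGov &&
      !([".json", ".jsonld", ".yaml", ".yml", ".txt", ".md"].any
          (fun suf => PySem.Str.endswith c suf)) &&
      (PySem.Str.endswith c "/" || decide (1 ≤ PySem.Str.count c "/"))
    (ytl, ytp, ltp, gcg, paGov, some (c, cGov, cCon))

def detect_sequences_legacy_alt (paths : List String) : List (String × Int) :=
  match paths.foldl bStep (0, 0, 0, 0, none, none) with
  | (ytl, ytp, ltp, gcg, _, _) =>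
    [("yaml_then_ledger", ytl), ("yaml_then_protocol", ytp),
     ("ledger_then_protocol", ltp), ("gov_content_gov", gcg)]

-- ===== PRECONDITION & SPEC =====
def Spec_detect_sequences_legacy (paths : List String) (out : List (String × Int)) : Prop := out = detect_sequences_legacy_alt paths
instance (paths : List String) (out : List (String × Int)) : Decidable (Spec_detect_sequences_legacy paths out) := by unfold Spec_detect_sequences_legacy; infer_instance

-- ===== CLAIM (what is proved, stated in full; the proofs are below) =====
def Claim_equal_detect_sequences_legacy : Prop := ∀ (paths : List String), Dom_detect_sequences_legacy paths → Spec_detect_sequences_legacy paths (detect_sequences_legacy paths)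

-- ===== LEMMAS AND PROOFS =====

-- the three pairwise motif conditions and the triple condition, named for the proofs
def c1 (a b : String) : Bool :=
  (PySem.Str.endswith a ".yml" || PySem.Str.endswith a ".yaml") &&
  PySem.Str.isIn "/.well-known/q-ledger" b
def c2 (a b : String) : Bool :=
  (PySem.Str.endswith a ".yml" || PySem.Str.endswith a ".yaml") &&
  PySem.Str.isIn "q-attest-protocol" b
def c3 (a b : String) : Bool :=
  PySem.Str.isIn "/.well-known/q-ledger" a && PySem.Str.isIn "q-attest-protocol" b
def q3 (a b c : String) : Bool :=
  is_governance_path_legacy a && is_content_path_legacy b && is_governance_path_legacy c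

-- B's inline content flag
def conB (c : String) : Bool :=
  !is_governance_path_legacy c &&
  !([".json", ".jsonld", ".yaml", ".yml", ".txt", ".md"].any
      (fun suf => PySem.Str.endswith c suf)) &&
  (PySem.Str.endswith c "/" || decide (1 ≤ PySem.Str.count c "/"))

lemma conB_eq (c : String) : conB c = is_content_path_legacy c := by
  unfold conB is_content_path_legacy
  cases h1 : is_governance_path_legacy c <;>
  cases h2 : ([".json", ".jsonld", ".yaml", ".yml", ".txt", ".md"].any
      (fun suf => PySem.Str.endswith c suf)) <;>
  simp only [Bool.not_true, Bool.not_false, Bool.true_and, Bool.false_and,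
    Bool.and_false, Bool.false_eq_true, if_pos, reduceIte]

-- structural window counters
def pairCnt (p : String → String → Bool) : List String → Int
  | a :: b :: t => (if p a b then 1 else 0) + pairCnt p (b :: t)
  | _ => 0

def triCnt : List String → Int
  | a :: b :: c :: t => (if q3 a b c then 1 else 0) + triCnt (b :: c :: t)
  | _ => 0

-- A's two loop bodies, as functions of the window
def stepPair (d : PySem.Dict String Int) (ab : String × String) : PySem.Dict String Int :=
  let d := if c1 ab.1 ab.2 then d.insert "yaml_then_ledger" (d.getD "yaml_then_ledger" 0 + 1) else d
  let d := if c2 ab.1 ab.2 then d.insert "yaml_then_protocol" (d.getD "yaml_then_protocol" 0 + 1) else d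
  if c3 ab.1 ab.2 then d.insert "ledger_then_protocol" (d.getD "ledger_then_protocol" 0 + 1) else d

def stepTri (d : PySem.Dict String Int) (t : String × String × String) : PySem.Dict String Int :=
  if q3 t.1 t.2.1 t.2.2 then d.insert "gov_content_gov" (d.getD "gov_content_gov" 0 + 1) else d

lemma map_pair (l : List String) :
    (PySem.List.pyRange 0 ((l.length : Int) - 1) 1).map
      (fun i => (PySem.List.pyGetD l i "", PySem.List.pyGetD l (i + 1) "")) = l.zip l.tail := by
  apply List.ext_getElem
  · simp [PySem.List.length_pyRange_one]
  · intro k h1 h2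
    simp only [PySem.List.length_pyRange_one, List.length_map] at h1
    simp only [List.getElem_map, PySem.List.getElem_pyRange_one, List.getElem_zip,
      List.getElem_tail, zero_add]
    have e : ((k : Int) + 1) = ((k + 1 : Nat) : Int) := by push_cast; ring
    rw [e, PySem.List.pyGetD_natCast, PySem.List.pyGetD_natCast]
    rw [List.getD_eq_getElem _ _ (by omega), List.getD_eq_getElem _ _ (by omega)]

lemma map_tri (l : List String) :
    (PySem.List.pyRange 0 ((l.length : Int) - 2) 1).map
      (fun i => (PySem.List.pyGetD l i "", PySem.List.pyGetD l (i + 1) "",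
                 PySem.List.pyGetD l (i + 2) "")) = l.zip (l.tail.zip l.tail.tail) := by
  apply List.ext_getElem
  · simp [PySem.List.length_pyRange_one]
    omega
  · intro k h1 h2
    simp only [PySem.List.length_pyRange_one, List.length_map] at h1
    simp only [List.getElem_map, PySem.List.getElem_pyRange_one, List.getElem_zip,
      List.getElem_tail, zero_add]
    have e1 : ((k : Int) + 1) = ((k + 1 : Nat) : Int) := by push_cast; ring
    have e2 : ((k : Int) + 2) = ((k + 2 : Nat) : Int) := by push_cast; ring
    rw [e1, e2, PySem.List.pyGetD_natCast, PySem.List.pyGetD_natCast,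
      PySem.List.pyGetD_natCast]
    rw [List.getD_eq_getElem _ _ (by omega), List.getD_eq_getElem _ _ (by omega),
      List.getD_eq_getElem _ _ (by omega)]

lemma addCnt (b : Bool) (y : Int) (n : Nat) :
    (if b then y + 1 else y) + (n : Int) = y + ((n + if b then 1 else 0 : Nat) : Int) := by
  cases b
  · simp
  · simp only [reduceIte]
    push_cast
    ring

lemma fold1 : ∀ (ps : List (String × String)) (y p l g : Int),
    ps.foldl stepPair
      (PySem.Dict.mk [("yaml_then_ledger", y), ("yaml_then_protocol", p),
                      ("ledger_then_protocol", l), ("gov_content_gov", g)]) =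
    PySem.Dict.mk [("yaml_then_ledger", y + (ps.countP (fun ab => c1 ab.1 ab.2) : Int)),
                   ("yaml_then_protocol", p + (ps.countP (fun ab => c2 ab.1 ab.2) : Int)),
                   ("ledger_then_protocol", l + (ps.countP (fun ab => c3 ab.1 ab.2) : Int)),
                   ("gov_content_gov", g)]
  | [], y, p, l, g => by simp
  | ab :: ps, y, p, l, g => by
    rw [List.foldl_cons]
    have hstep : stepPair
        (PySem.Dict.mk [("yaml_then_ledger", y), ("yaml_then_protocol", p),
                        ("ledger_then_protocol", l), ("gov_content_gov", g)]) ab =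
        PySem.Dict.mk [("yaml_then_ledger", if c1 ab.1 ab.2 then y + 1 else y),
                       ("yaml_then_protocol", if c2 ab.1 ab.2 then p + 1 else p),
                       ("ledger_then_protocol", if c3 ab.1 ab.2 then l + 1 else l),
                       ("gov_content_gov", g)] := by
      unfold stepPair; split_ifs <;> rfl
    rw [hstep, fold1 ps _ _ _ _]
    simp only [List.countP_cons, ← addCnt]

lemma fold2 : ∀ (ts : List (String × String × String)) (y p l g : Int),
    ts.foldl stepTri
      (PySem.Dict.mk [("yaml_then_ledger", y), ("yaml_then_protocol", p),
                      ("ledger_then_protocol", l), ("gov_content_gov", g)]) =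
    PySem.Dict.mk [("yaml_then_ledger", y), ("yaml_then_protocol", p),
                   ("ledger_then_protocol", l),
                   ("gov_content_gov", g + (ts.countP (fun t => q3 t.1 t.2.1 t.2.2) : Int))]
  | [], y, p, l, g => by simp
  | t :: ts, y, p, l, g => by
    rw [List.foldl_cons]
    have hstep : stepTri
        (PySem.Dict.mk [("yaml_then_ledger", y), ("yaml_then_protocol", p),
                        ("ledger_then_protocol", l), ("gov_content_gov", g)]) t =
        PySem.Dict.mk [("yaml_then_ledger", y), ("yaml_then_protocol", p),
                       ("ledger_then_protocol", l),
                       ("gov_content_gov", if q3 t.1 t.2.1 t.2.2 then g + 1 else g)] := by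
      unfold stepTri; split_ifs <;> rfl
    rw [hstep, fold2 ts _ _ _ _]
    simp only [List.countP_cons, ← addCnt]

lemma cntPair (p : String → String → Bool) : ∀ l : List String,
    ((l.zip l.tail).countP (fun ab => p ab.1 ab.2) : Int) = pairCnt p l
  | [] => by simp [pairCnt]
  | [a] => by simp [pairCnt]
  | a :: b :: t => by
    simp only [List.tail_cons, List.zip_cons_cons, List.countP_cons]
    rw [show pairCnt p (a :: b :: t) = (if p a b then 1 else 0) + pairCnt p (b :: t) from rfl]
    rw [← cntPair p (b :: t)]
    simp only [List.tail_cons]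
    cases h : p a b
    · simp
    · simp only [reduceIte]
      push_cast
      ring

lemma cntTri : ∀ l : List String,
    ((l.zip (l.tail.zip l.tail.tail)).countP (fun t => q3 t.1 t.2.1 t.2.2) : Int) = triCnt l
  | [] => by simp [triCnt]
  | [a] => by simp [triCnt]
  | [a, b] => by simp [triCnt]
  | a :: b :: c :: t => by
    simp only [List.tail_cons, List.zip_cons_cons, List.countP_cons]
    rw [show triCnt (a :: b :: c :: t) = (if q3 a b c then 1 else 0) + triCnt (b :: c :: t) from rfl]
    rw [← cntTri (b :: c :: t)]
    simp only [List.tail_cons]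
    cases h : q3 a b c
    · simp
    · simp only [reduceIte]
      push_cast
      ring

lemma A_eq (l : List String) :
    detect_sequences_legacy l =
      [("yaml_then_ledger", pairCnt c1 l), ("yaml_then_protocol", pairCnt c2 l),
       ("ledger_then_protocol", pairCnt c3 l), ("gov_content_gov", triCnt l)] := by
  show ((PySem.List.pyRange 0 ((l.length : Int) - 2) 1).foldl
          (fun d i => stepTri d (PySem.List.pyGetD l i "", PySem.List.pyGetD l (i + 1) "",
                                 PySem.List.pyGetD l (i + 2) ""))
          ((PySem.List.pyRange 0 ((l.length : Int) - 1) 1).foldl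
            (fun d i => stepPair d (PySem.List.pyGetD l i "", PySem.List.pyGetD l (i + 1) ""))
            (PySem.Dict.ofList [("yaml_then_ledger", 0), ("yaml_then_protocol", 0),
                                ("ledger_then_protocol", 0), ("gov_content_gov", 0)]))).items = _
  have hp : ∀ init : PySem.Dict String Int,
      (PySem.List.pyRange 0 ((l.length : Int) - 1) 1).foldl
        (fun d i => stepPair d (PySem.List.pyGetD l i "", PySem.List.pyGetD l (i + 1) "")) init
      = (l.zip l.tail).foldl stepPair init := by
    intro init
    rw [← map_pair l, List.foldl_map]
  have ht : ∀ init : PySem.Dict String Int,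
      (PySem.List.pyRange 0 ((l.length : Int) - 2) 1).foldl
        (fun d i => stepTri d (PySem.List.pyGetD l i "", PySem.List.pyGetD l (i + 1) "",
                               PySem.List.pyGetD l (i + 2) "")) init
      = (l.zip (l.tail.zip l.tail.tail)).foldl stepTri init := by
    intro init
    rw [← map_tri l, List.foldl_map]
  rw [hp, ht]
  rw [show (PySem.Dict.ofList [("yaml_then_ledger", (0 : Int)), ("yaml_then_protocol", 0),
        ("ledger_then_protocol", 0), ("gov_content_gov", 0)] : PySem.Dict String Int)
      = PySem.Dict.mk [("yaml_then_ledger", 0), ("yaml_then_protocol", 0),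
        ("ledger_then_protocol", 0), ("gov_content_gov", 0)] from rfl]
  rw [fold1, fold2]
  simp only [zero_add, cntPair c1 l, cntPair c2 l, cntPair c3 l, cntTri l]

-- B's end-of-loop window state
def endSt : String → String → List String → Option Bool × Option (String × Bool × Bool)
  | a, b, [] => (some (is_governance_path_legacy a), some (b, is_governance_path_legacy b, conB b))
  | _, b, c :: t => endSt b c t

lemma loopB_two : ∀ (t : List String) (a b : String) (y1 y2 y3 y4 : Int),
    t.foldl bStep (y1, y2, y3, y4, some (is_governance_path_legacy a),
                   some (b, is_governance_path_legacy b, conB b)) =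
    (y1 + pairCnt c1 (b :: t), y2 + pairCnt c2 (b :: t), y3 + pairCnt c3 (b :: t),
     y4 + triCnt (a :: b :: t), endSt a b t)
  | [], a, b, y1, y2, y3, y4 => by
    simp [pairCnt, triCnt, endSt]
  | c :: t, a, b, y1, y2, y3, y4 => by
    rw [List.foldl_cons]
    have hb : bStep (y1, y2, y3, y4, some (is_governance_path_legacy a),
                     some (b, is_governance_path_legacy b, conB b)) c
        = (if c1 b c then y1 + 1 else y1, if c2 b c then y2 + 1 else y2,
           if c3 b c then y3 + 1 else y3,
           if is_governance_path_legacy a && conB b && is_governance_path_legacy c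
             then y4 + 1 else y4,
           some (is_governance_path_legacy b), some (c, is_governance_path_legacy c, conB c)) := rfl
    rw [hb, loopB_two t b c _ _ _ _]
    simp only [pairCnt, triCnt, q3, conB_eq, endSt, Prod.mk.injEq, and_true]
    and_intros <;> first
      | rfl
      | (split_ifs <;> ring)

lemma alt_eq (l : List String) :
    detect_sequences_legacy_alt l =
      [("yaml_then_ledger", pairCnt c1 l), ("yaml_then_protocol", pairCnt c2 l),
       ("ledger_then_protocol", pairCnt c3 l), ("gov_content_gov", triCnt l)] := by
  match l with
  | [] => rfl
  | [a] => rfl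
  | a :: b :: t =>
    unfold detect_sequences_legacy_alt
    rw [List.foldl_cons, List.foldl_cons]
    have h1 : bStep (0, 0, 0, 0, none, none) a
        = (0, 0, 0, 0, none, some (a, is_governance_path_legacy a, conB a)) := rfl
    rw [h1]
    have h2 : bStep (0, 0, 0, 0, none, some (a, is_governance_path_legacy a, conB a)) b
        = (if c1 a b then (0 : Int) + 1 else 0, if c2 a b then (0 : Int) + 1 else 0,
           if c3 a b then (0 : Int) + 1 else 0, (0 : Int),
           some (is_governance_path_legacy a), some (b, is_governance_path_legacy b, conB b)) := rfl
    rw [h2, loopB_two t a b _ _ _ _]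
    simp only [pairCnt, List.cons.injEq, Prod.mk.injEq, and_true, true_and]
    and_intros <;> first
      | rfl
      | (split_ifs <;> ring)
      | ring

-- ===== VERDICT (by name: the statement is the Claim_ definition above) =====
theorem detect_sequences_legacy_spec : Claim_equal_detect_sequences_legacy := by
  intro paths _
  unfold Spec_detect_sequences_legacy
  rw [A_eq, alt_eq]
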